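-- pv_equiv track=rewrite | github.com/rubenselander/BR--data-scraper | bra_scraper/bra_scraper.py | combine_rows_with_missing_values
-- ===== SOURCE A (Python) =====
-- def combine_rows_with_missing_values(
--     records, identifying_keys=["Region", "Brott", "År", "Period"]
-- ):
--     combined_records = {}
--
--     # Iterate through each record
--     for record in records:
--         # Create a unique key based on the identifying fields
--         key = tuple(record[id_key] for id_key in identifying_keys)
--
--         # If the key is not in the combined_records, add it
--         if key not in combined_records:
--             combined_records[key] = record.copy()
--         else:
--             # For existing keys, update only the null values from the new record
--             for k, v in record.items():
--                 if combined_records[key].get(k) is None and v is not None: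
--                     combined_records[key][k] = v
--
--     return list(combined_records.values())
-- ===== SOURCE B (Python) =====
-- def combine_rows_with_missing_values(
--     records, identifying_keys=["Region", "Brott", "År", "Period"]
-- ):
--     # Field-centric brute force: emit one row per distinct key tuple (first-appearance
--     # order); each output field's value is chosen directly as the first non-null value
--     # for that field among the rows of the group, with no incremental merging dict.
--     def key_of(r):
--         return tuple(r[k] for k in identifying_keys)
--
--     result = []
--     seen = []
--     for record in records:
--         kt = key_of(record)
--         if kt in seen:
--             continue
--         seen.append(kt)
--         group = [r for r in records if key_of(r) == kt]
--         # field order: leader's fields, then new fields at their first non-null appearance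
--         fields = list(group[0])
--         for r in group[1:]:
--             for f, v in r.items():
--                 if v is not None and f not in fields:
--                     fields.append(f)
--         result.append({
--             f: next((r[f] for r in group if r.get(f) is not None), None)
--             for f in fields
--         })
--     return result
-- ===== Notes on version B (the rewrite author's own statement) =====
-- stated objective: alternative
-- what changed: B drops A's incremental merging dict entirely: it emits one row per distinct key tuple (first-appearance order, tracked in a seen list) and, per row, rescans the records of that group to build the field list and pick each field's value directly as the first non-null occurrence, instead of folding records one by one into a growing combined dict.
import Mathlib
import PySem

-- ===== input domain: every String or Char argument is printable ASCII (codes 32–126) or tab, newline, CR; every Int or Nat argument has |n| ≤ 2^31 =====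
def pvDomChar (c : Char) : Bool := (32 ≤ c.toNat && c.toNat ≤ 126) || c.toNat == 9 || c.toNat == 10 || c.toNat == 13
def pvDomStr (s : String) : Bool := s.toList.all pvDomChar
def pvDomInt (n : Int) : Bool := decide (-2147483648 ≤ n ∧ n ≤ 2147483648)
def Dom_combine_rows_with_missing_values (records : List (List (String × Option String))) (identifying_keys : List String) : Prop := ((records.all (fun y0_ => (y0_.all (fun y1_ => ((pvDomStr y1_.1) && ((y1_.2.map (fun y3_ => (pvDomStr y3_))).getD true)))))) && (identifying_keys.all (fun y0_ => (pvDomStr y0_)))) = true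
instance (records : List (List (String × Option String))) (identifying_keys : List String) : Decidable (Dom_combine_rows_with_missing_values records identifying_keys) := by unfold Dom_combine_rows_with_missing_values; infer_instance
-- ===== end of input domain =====

-- B replaces A's incremental merging dict by a field-centric brute force: one output row
-- per distinct key tuple (first-appearance order), each field's value picked directly as
-- the first non-null value for that field among the group's rows; equal RETURN values are
-- proved on Pre_ (every identifying key present, where Python A returns instead of raising
-- KeyError). Neither program mutates its arguments.

-- ===== PORT A =====
-- Each Python record is a dict built from the association list (PySem.Dict.ofList is
-- exactly that conversion); both ports receive dicts, so both convert up front.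
def pvRecOf (recL : List (String × Option String)) : PySem.Dict String (Option String) :=
  PySem.Dict.ofList recL

-- key = tuple(record[id_key] for id_key in identifying_keys); total via getD none — Pre_
-- excludes the inputs where Python raises KeyError (a missing identifying key).
def pvKeyOf (record : PySem.Dict String (Option String)) (identifying_keys : List String) :
    List (Option String) :=
  identifying_keys.map (fun id_key => record.getD id_key none)

-- A's inner loop body: if combined_records[key].get(k) is None and v is not None: …[k] = v
def pvFillA (cur : PySem.Dict String (Option String)) (p : String × Option String) :
    PySem.Dict String (Option String) :=
  if cur.getD p.1 none = none ∧ p.2 ≠ none then cur.insert p.1 p.2 else cur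

def pvStepA (identifying_keys : List String)
    (combined : PySem.Dict (List (Option String)) (PySem.Dict String (Option String)))
    (record : PySem.Dict String (Option String)) :
    PySem.Dict (List (Option String)) (PySem.Dict String (Option String)) :=
  let key := pvKeyOf record identifying_keys
  if combined.contains key = false then
    combined.insert key record
  else
    combined.insert key (record.items.foldl pvFillA (combined.getD key PySem.Dict.empty))

def combine_rows_with_missing_values (records : List (List (String × Option String)))
    (identifying_keys : List String) : List (List (String × Option String)) :=
  (((records.map pvRecOf).foldl (pvStepA identifying_keys) PySem.Dict.empty).values).map
    PySem.Dict.items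

-- ===== PORT B =====
-- next((r[f] for r in group if r.get(f) is not None), None)
def pvLookNN (group : List (PySem.Dict String (Option String))) (f : String) : Option String :=
  match group.find? (fun r => (r.getD f none).isSome) with
  | some r => r.getD f none
  | none => none

-- if v is not None and f not in fields: fields.append(f)
def pvFStep (fs : List String) (p : String × Option String) : List String :=
  if p.2 ≠ none ∧ p.1 ∉ fs then fs ++ [p.1] else fs

-- fields = list(group[0]); for r in group[1:]: for f, v in r.items(): …
def pvFieldsOf (group : List (PySem.Dict String (Option String))) : List String :=
  match group with
  | [] => []
  | g0 :: rest => rest.foldl (fun fs r => r.items.foldl pvFStep fs) g0.keys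

-- the dict comprehension {f: next(…) for f in fields}
def pvMergeB (group : List (PySem.Dict String (Option String))) :
    PySem.Dict String (Option String) :=
  PySem.Dict.ofList ((pvFieldsOf group).map (fun f => (f, pvLookNN group f)))

-- the main loop: skip seen key tuples, else emit the merged row of the key's group
def pvBLoop (all : List (PySem.Dict String (Option String))) (ik : List String) :
    List (PySem.Dict String (Option String)) → List (List (Option String)) →
    List (PySem.Dict String (Option String))
  | [], _ => []
  | r :: rest, seen =>
    let kt := pvKeyOf r ik
    if kt ∈ seen then pvBLoop all ik rest seen
    else pvMergeB (all.filter (fun r' => pvKeyOf r' ik == kt)) :: pvBLoop all ik rest (seen ++ [kt])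

def combine_rows_with_missing_values_alt (records : List (List (String × Option String)))
    (identifying_keys : List String) : List (List (String × Option String)) :=
  let all := records.map pvRecOf
  (pvBLoop all identifying_keys all []).map PySem.Dict.items

-- ===== PRECONDITION & SPEC =====
-- Pre_ excludes exactly the inputs where Python A raises KeyError: a record missing one of
-- the identifying keys (B raises there too).
def Pre_combine_rows_with_missing_values (records : List (List (String × Option String))) (identifying_keys : List String) : Prop :=
  ∀ r ∈ records, ∀ k ∈ identifying_keys, k ∈ r.map Prod.fst
instance (records : List (List (String × Option String))) (identifying_keys : List String) : Decidable (Pre_combine_rows_with_missing_values records identifying_keys) := by unfold Pre_combine_rows_with_missing_values; infer_instance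

def pvWitness_combine_rows_with_missing_values : (List (List (String × Option String))) × List String :=
  ([[("a", some "1"), ("b", none)], [("a", some "1"), ("b", some "2")]], ["a"])

def Spec_combine_rows_with_missing_values (records : List (List (String × Option String))) (identifying_keys : List String) (out : List (List (String × Option String))) : Prop := out = combine_rows_with_missing_values_alt records identifying_keys
instance (records : List (List (String × Option String))) (identifying_keys : List String) (out : List (List (String × Option String))) : Decidable (Spec_combine_rows_with_missing_values records identifying_keys out) := by unfold Spec_combine_rows_with_missing_values; infer_instance

-- ===== CLAIM (what is proved, stated in full; the proofs are below) =====
def Claim_equal_combine_rows_with_missing_values : Prop := ∀ (records : List (List (String × Option String))) (identifying_keys : List String), Dom_combine_rows_with_missing_values records identifying_keys → Pre_combine_rows_with_missing_values records identifying_keys → Spec_combine_rows_with_missing_values records identifying_keys (combine_rows_with_missing_values records identifying_keys)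

-- ===== LEMMAS AND PROOFS =====

-- abbreviations for the proof only
def pvGrpOf (all : List (PySem.Dict String (Option String))) (ik : List String)
    (k : List (Option String)) : List (PySem.Dict String (Option String)) :=
  all.filter (fun r => pvKeyOf r ik == k)

-- the key tuples B's loop emits (= first appearance order, given the seen accumulator)
def pvNewKeys (ik : List String) :
    List (PySem.Dict String (Option String)) → List (List (Option String)) →
    List (List (Option String))
  | [], _ => []
  | r :: rest, seen =>
    let kt := pvKeyOf r ik
    if kt ∈ seen then pvNewKeys ik rest seen else kt :: pvNewKeys ik rest (seen ++ [kt])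

-- A's fold of one whole group (leader, then fill from the rest)
def pvMergeA (group : List (PySem.Dict String (Option String))) :
    PySem.Dict String (Option String) :=
  match group with
  | [] => PySem.Dict.empty
  | g0 :: rest => rest.foldl (fun m r => r.items.foldl pvFillA m) g0

-- first value for key f in an item list, none if absent
def pvLook (L : List (String × Option String)) (f : String) : Option String :=
  ((L.find? (fun q => q.1 == f)).map Prod.snd).getD none
lemma pvBLoop_eq (all : List (PySem.Dict String (Option String))) (ik : List String)
    (l : List (PySem.Dict String (Option String))) (seen : List (List (Option String))) :
    pvBLoop all ik l seen = (pvNewKeys ik l seen).map (fun k => pvMergeB (pvGrpOf all ik k)) := by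
  induction l generalizing seen with
  | nil => simp [pvBLoop, pvNewKeys]
  | cons r rest ih =>
    simp only [pvBLoop, pvNewKeys]
    by_cases h : pvKeyOf r ik ∈ seen
    · simp [if_pos h, ih]
    · simp [if_neg h, ih, pvGrpOf]

lemma pvFieldsOf_append (g0 r : PySem.Dict String (Option String))
    (rest : List (PySem.Dict String (Option String))) :
    pvFieldsOf (g0 :: (rest ++ [r])) = r.items.foldl pvFStep (pvFieldsOf (g0 :: rest)) := by
  simp [pvFieldsOf, List.foldl_append]

lemma pvMergeA_append (grp : List (PySem.Dict String (Option String)))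
    (r : PySem.Dict String (Option String)) (h : grp ≠ []) :
    pvMergeA (grp ++ [r]) = r.items.foldl pvFillA (pvMergeA grp) := by
  cases grp with
  | nil => exact absurd rfl h
  | cons g0 rest => simp [pvMergeA, List.foldl_append]

lemma pvLookNN_append (grp : List (PySem.Dict String (Option String)))
    (r : PySem.Dict String (Option String)) (f : String) :
    pvLookNN (grp ++ [r]) f = if pvLookNN grp f = none then r.getD f none else pvLookNN grp f := by
  unfold pvLookNN
  rw [List.find?_append]
  cases h : grp.find? (fun r => (r.getD f none).isSome) with
  | none =>
    simp only [Option.none_or]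
    cases h2 : (r.getD f none).isSome with
    | true => simp [List.find?, h2]
    | false =>
      simp only [List.find?, h2]
      exact (Option.not_isSome_iff_eq_none.mp (by simp [h2])).symm
  | some r' =>
    have := List.find?_some h
    simp only [Option.some_or]
    rw [if_neg (Option.isSome_iff_ne_none.mp (by simpa using this))]

lemma pvFStep_foldl (L : List (String × Option String)) :
    ∀ (fs : List String), (L.map Prod.fst).Nodup →
    L.foldl pvFStep fs = fs ++ (L.filter (fun q => q.2.isSome && !(decide (q.1 ∈ fs)))).map Prod.fst := by
  induction L with
  | nil => simp
  | cons q L' ih =>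
    intro fs hnd
    simp only [List.map_cons, List.nodup_cons] at hnd
    obtain ⟨hq, hnd'⟩ := hnd
    simp only [List.foldl_cons, List.filter_cons, pvFStep]
    by_cases hc : q.2 ≠ none ∧ q.1 ∉ fs
    · rw [if_pos hc]
      rw [ih _ hnd']
      have hfilt : L'.filter (fun p => p.2.isSome && !(decide (p.1 ∈ fs ++ [q.1])))
          = L'.filter (fun p => p.2.isSome && !(decide (p.1 ∈ fs))) := by
        apply List.filter_congr
        intro p hp
        have : p.1 ≠ q.1 := fun he => hq (he ▸ List.mem_map_of_mem hp)
        simp [this]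
      rw [hfilt]
      have : (q.2.isSome && !(decide (q.1 ∈ fs))) = true := by
        simp [hc.2, Option.isSome_iff_ne_none.mpr hc.1]
      simp [this]
    · rw [if_neg hc]
      rw [ih _ hnd']
      have : (q.2.isSome && !(decide (q.1 ∈ fs))) = false := by
        rcases not_and_or.mp hc with h | h
        · simp [Option.not_isSome_iff_eq_none.mpr (not_not.mp h)]
        · simp [not_not.mp h]
      simp [this]

lemma pvMergeB_items (grp : List (PySem.Dict String (Option String)))
    (hnd : (pvFieldsOf grp).Nodup) :
    (pvMergeB grp).items = (pvFieldsOf grp).map (fun f => (f, pvLookNN grp f)) := by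
  unfold pvMergeB PySem.Dict.ofList PySem.Dict.update
  rw [PySem.Dict.items_foldl_insert_fresh (k := Prod.fst) (v := Prod.snd)]
  · simp [PySem.Dict.empty]
  · intro a _; simp [PySem.Dict.contains_empty]
  · simpa [List.map_map, Function.comp_def] using hnd

lemma pvFill_foldl (L : List (String × Option String)) :
    ∀ (m : PySem.Dict String (Option String)), m.keys.Nodup → (L.map Prod.fst).Nodup →
    (L.foldl pvFillA m).items =
      m.items.map (fun p => if p.2 = none then (p.1, pvLook L p.1) else p)
      ++ L.filter (fun q => q.2.isSome && !(m.contains q.1)) := by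
  induction L with
  | nil =>
    intro m _ _
    have hid : (fun p : String × Option String => if p.2 = none then (p.1, pvLook [] p.1) else p) = id := by
      funext p; obtain ⟨a, b⟩ := p; cases b <;> simp [pvLook]
    simp [hid]
  | cons q L' ih =>
    intro m hm hnd
    simp only [List.map_cons, List.nodup_cons] at hnd
    obtain ⟨hq, hnd'⟩ := hnd
    simp only [List.foldl_cons, List.filter_cons]
    by_cases hc : m.getD q.1 none = none ∧ q.2 ≠ none
    · -- the fill fires: insert
      have hfill : pvFillA m q = m.insert q.1 q.2 := by simp [pvFillA, hc]
      by_cases hc2 : m.contains q.1 = true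
      · -- overwrite in place
        have hkeys : (m.insert q.1 q.2).keys = m.keys := PySem.Dict.keys_insert_of_contains m q.2 hc2
        rw [hfill, ih _ (by rw [hkeys]; exact hm) hnd']
        rw [PySem.Dict.items_insert_of_contains m q.2 hc2]
        have hcontains : ∀ x, (m.insert q.1 q.2).contains x = m.contains x := by
          intro x
          rw [PySem.Dict.contains_eq_decide_mem_keys, PySem.Dict.contains_eq_decide_mem_keys, hkeys]
        have hfilt : L'.filter (fun p => p.2.isSome && !((m.insert q.1 q.2).contains p.1))
            = L'.filter (fun p => p.2.isSome && !(m.contains p.1)) := by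
          apply List.filter_congr; intro p _; rw [hcontains]
        rw [hfilt]
        have hqdrop : (q.2.isSome && !(m.contains q.1)) = false := by simp [hc2]
        rw [hqdrop]
        simp only [List.map_map]
        congr 1
        apply List.map_congr_left
        rintro ⟨p1, p2⟩ hp
        simp only [Function.comp_apply]
        by_cases hpq : p1 = q.1
        · have hgd : m.getD p1 none = p2 := PySem.Dict.getD_of_mem_items m hp hm none
          have hval : p2 = none := by rw [hpq] at hgd; rw [← hgd]; exact hc.1
          have hbeq : (p1 == q.1) = true := by simp [hpq]
          have hlook : pvLook (q :: L') p1 = q.2 := by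
            simp [pvLook, List.find?, show (q.1 == p1) = true by simp [hpq]]
          simp [hc.2, hval, hpq, hpq ▸ hlook]
        · have hbeq : (p1 == q.1) = false := by simp [hpq]
          have hlook : pvLook (q :: L') p1 = pvLook L' p1 := by
            simp [pvLook, List.find?, show (q.1 == p1) = false by simp [Ne.symm hpq]]
          simp only [hbeq, Bool.false_eq_true, if_false, hlook]
      · -- fresh key: append
        have hc2' : m.contains q.1 = false := by simpa using hc2
        have hkeys : (m.insert q.1 q.2).keys = m.keys ++ [q.1] :=
          PySem.Dict.keys_insert_of_not_contains m q.2 hc2'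
        have hqnotmem : q.1 ∉ m.keys := by
          intro hmem; exact hc2 ((PySem.Dict.contains_iff_mem_keys m q.1).mpr hmem)
        rw [hfill, ih _ (by
          rw [hkeys]
          exact List.Nodup.append hm (List.nodup_singleton _)
            (by simpa [List.disjoint_singleton] using hqnotmem)) hnd']
        rw [PySem.Dict.items_insert_of_not_contains m q.2 hc2']
        have hfilt : L'.filter (fun p => p.2.isSome && !((m.insert q.1 q.2).contains p.1))
            = L'.filter (fun p => p.2.isSome && !(m.contains p.1)) := by
          apply List.filter_congr; intro p hp
          have hne : p.1 ≠ q.1 := fun he => hq (he ▸ List.mem_map_of_mem hp)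
          rw [PySem.Dict.contains_eq_decide_mem_keys, PySem.Dict.contains_eq_decide_mem_keys, hkeys]
          simp [hne]
        rw [hfilt]
        have hqkeep : (q.2.isSome && !(m.contains q.1)) = true := by
          simp [hc2', Option.isSome_iff_ne_none.mpr hc.2]
        rw [hqkeep]
        simp only [List.map_append, List.map_cons, List.map_nil]
        have hupd : (fun p => if p.2 = none then (p.1, pvLook L' p.1) else p) (q.1, q.2) = (q.1, q.2) := by
          simp [hc.2]
        rw [List.append_assoc]
        congr 1
        · apply List.map_congr_left
          intro p hp
          have hne : p.1 ≠ q.1 := by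
            intro he
            exact hqnotmem (he ▸ PySem.Dict.mem_keys_of_mem_items m hp)
          by_cases hv : p.2 = none
          · simp only [if_pos hv]
            have : pvLook (q :: L') p.1 = pvLook L' p.1 := by
              simp [pvLook, List.find?, show (q.1 == p.1) = false by simp [hne.symm]]
            rw [this]
          · simp [if_neg hv]
        · simp [hc.2]
    · -- fill does not fire
      have hfill : pvFillA m q = m := by simp [pvFillA, hc]
      rw [hfill, ih _ hm hnd']
      have hqdrop : (q.2.isSome && !(m.contains q.1)) = false := by
        rcases not_and_or.mp hc with h | h
        · have : m.contains q.1 = true := by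
            rw [PySem.Dict.contains_eq_isSome_get?]
            rcases hg : m.get? q.1 with _ | w
            · exact absurd (by simp [PySem.Dict.getD_eq_get?_getD, hg]) h
            · simp
          simp [this]
        · simp [Option.not_isSome_iff_eq_none.mpr (not_not.mp h)]
      rw [hqdrop]
      congr 1
      apply List.map_congr_left
      intro p hp
      by_cases hv : p.2 = none
      · simp only [if_pos hv]
        by_cases hpq : q.1 = p.1
        · have hgd : m.getD p.1 none = p.2 := PySem.Dict.getD_of_mem_items m (Prod.mk.eta ▸ hp) hm none
          have hq2 : q.2 = none := by
            rcases not_and_or.mp hc with h | h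
            · exact absurd (by rw [hpq, hgd, hv]) h
            · exact not_not.mp h
          have h1 : pvLook (q :: L') p.1 = none := by
            simp [pvLook, List.find?, show (q.1 == p.1) = true by simp [hpq], hq2]
          have h2 : pvLook L' p.1 = none := by
            have : L'.find? (fun q' => q'.1 == p.1) = none := by
              rw [List.find?_eq_none]
              intro x hx
              simp only [beq_iff_eq]
              intro he
              exact hq (by rw [← hpq] at he; exact he ▸ List.mem_map_of_mem hx)
            simp [pvLook, this]
          rw [h1, h2]
        · have : pvLook (q :: L') p.1 = pvLook L' p.1 := by
            simp [pvLook, List.find?, show (q.1 == p.1) = false by simp [hpq]]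
          rw [this]
      · simp [if_neg hv]

lemma pvLook_items (d : PySem.Dict String (Option String)) (f : String) :
    pvLook d.items f = d.getD f none := rfl

lemma pvKeys_map_fst {κ ν : Type} [BEq κ] (d : PySem.Dict κ ν) :
    d.items.map Prod.fst = d.keys := rfl

lemma pvFieldsOf_nodup (g0 : PySem.Dict String (Option String))
    (rest : List (PySem.Dict String (Option String))) (h0 : g0.keys.Nodup)
    (hr : ∀ r ∈ rest, r.keys.Nodup) : (pvFieldsOf (g0 :: rest)).Nodup := by
  induction rest using List.reverseRecOn with
  | nil => simpa [pvFieldsOf] using h0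
  | append_singleton rest r ih =>
    have hrr : r.keys.Nodup := hr r (by simp)
    have hih := ih (fun r' h => hr r' (by simp [h]))
    rw [pvFieldsOf_append, pvFStep_foldl _ _ (by rw [pvKeys_map_fst]; exact hrr)]
    refine List.Nodup.append hih ?_ ?_
    · exact (List.Sublist.map Prod.fst List.filter_sublist).nodup
        (by rw [pvKeys_map_fst]; exact hrr)
    · intro f hf hmem
      simp only [List.mem_map] at hmem
      obtain ⟨q, hq, rfl⟩ := hmem
      have := List.of_mem_filter hq
      simp at this
      exact this.2 hf

lemma pvFieldsOf_out (g0 : PySem.Dict String (Option String))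
    (rest : List (PySem.Dict String (Option String)))
    (hr : ∀ r ∈ rest, r.keys.Nodup) :
    ∀ f, f ∉ pvFieldsOf (g0 :: rest) → ∀ g ∈ (g0 :: rest), g.getD f none = none := by
  induction rest using List.reverseRecOn with
  | nil =>
    intro f hf g hg
    simp only [List.mem_singleton] at hg
    subst hg
    apply PySem.Dict.getD_of_not_contains
    rw [← Bool.not_eq_true, PySem.Dict.contains_iff_mem_keys]
    simpa [pvFieldsOf] using hf
  | append_singleton rest r ih =>
    intro f hf g hg
    have hrr : r.keys.Nodup := hr r (by simp)
    have hfs : f ∉ pvFieldsOf (g0 :: rest) := by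
      intro hmem
      apply hf
      rw [pvFieldsOf_append, pvFStep_foldl _ _ (by rw [pvKeys_map_fst]; exact hrr)]
      exact List.mem_append_left _ hmem
    rcases List.mem_cons.mp hg with rfl | hg'
    · exact ih (fun r' h => hr r' (by simp [h])) f hfs g (by simp)
    rcases List.mem_append.mp hg' with hg'' | hg''
    · exact ih (fun r' h => hr r' (by simp [h])) f hfs g (List.mem_cons_of_mem _ hg'')
    · -- g = r
      simp only [List.mem_singleton] at hg''
      subst hg''
      by_contra hne
      rcases hgd : g.get? f with _ | w
      · exact hne (by simp [PySem.Dict.getD_eq_get?_getD, hgd])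
      have hw : w ≠ none := fun h => hne (by simp [PySem.Dict.getD_eq_get?_getD, hgd, h])
      have hmem : (f, w) ∈ g.items := PySem.Dict.mem_items_of_get?_eq_some _ hgd
      apply hf
      rw [pvFieldsOf_append, pvFStep_foldl _ _ (by rw [pvKeys_map_fst]; exact hrr)]
      refine List.mem_append_right _ ?_
      refine List.mem_map.mpr ⟨(f, w), List.mem_filter.mpr ⟨hmem, ?_⟩, rfl⟩
      simp [Option.isSome_iff_ne_none.mpr hw, hfs]

lemma pvLookNN_eq_none (grp : List (PySem.Dict String (Option String)))
    (f : String) (h : ∀ g ∈ grp, g.getD f none = none) : pvLookNN grp f = none := by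
  unfold pvLookNN
  rw [List.find?_eq_none.mpr (fun g hg => by simp [h g hg])]

lemma pvMergeA_items (g0 : PySem.Dict String (Option String))
    (rest : List (PySem.Dict String (Option String))) (h0 : g0.keys.Nodup)
    (hr : ∀ r ∈ rest, r.keys.Nodup) :
    (pvMergeA (g0 :: rest)).items
      = (pvFieldsOf (g0 :: rest)).map (fun f => (f, pvLookNN (g0 :: rest) f)) := by
  induction rest using List.reverseRecOn with
  | nil =>
    have : pvMergeA [g0] = g0 := rfl
    rw [this]
    rw [PySem.Dict.items_eq_map_keys g0 h0 none]
    show _ = g0.keys.map _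
    apply List.map_congr_left
    intro f _
    have : pvLookNN [g0] f = g0.getD f none := by
      unfold pvLookNN
      cases h : (g0.getD f none).isSome with
      | true => rw [List.find?_cons_of_pos (by simp [h])]
      | false =>
        rw [List.find?_cons_of_neg (by simp [h]), List.find?_nil]
        exact (Option.not_isSome_iff_eq_none.mp (by simp [h])).symm
    rw [this]
  | append_singleton rest r ih =>
    have hrr : r.keys.Nodup := hr r (by simp)
    have hrest : ∀ r' ∈ rest, r'.keys.Nodup := fun r' h => hr r' (by simp [h])
    have hM := ih hrest
    have hfld := pvFieldsOf_nodup g0 rest h0 hrest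
    have hMkeys : (pvMergeA (g0 :: rest)).keys = pvFieldsOf (g0 :: rest) := by
      rw [← pvKeys_map_fst, hM, List.map_map]
      simp [Function.comp_def]
    have hgrp : g0 :: (rest ++ [r]) = (g0 :: rest) ++ [r] := by simp
    rw [hgrp, pvMergeA_append _ _ (by simp)]
    rw [pvFill_foldl _ _ (by rw [hMkeys]; exact hfld) (by rw [pvKeys_map_fst]; exact hrr)]
    rw [← hgrp, pvFieldsOf_append, pvFStep_foldl _ _ (by rw [pvKeys_map_fst]; exact hrr)]
    rw [List.map_append]
    congr 1
    · -- existing fields, updated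
      rw [hM, List.map_map]
      apply List.map_congr_left
      intro f _
      simp only [Function.comp_apply]
      have happ : pvLookNN (g0 :: (rest ++ [r])) f
          = if pvLookNN (g0 :: rest) f = none then r.getD f none else pvLookNN (g0 :: rest) f := by
        rw [hgrp]; exact pvLookNN_append _ _ _
      by_cases hv : pvLookNN (g0 :: rest) f = none
      · simp [hv, happ, pvLook_items]
      · simp [hv, happ]
    · -- new fields appended
      have hcont : ∀ q : String × Option String,
          (q.2.isSome && !((pvMergeA (g0 :: rest)).contains q.1))
            = (q.2.isSome && !(decide (q.1 ∈ pvFieldsOf (g0 :: rest)))) := by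
        intro q
        rw [PySem.Dict.contains_eq_decide_mem_keys, hMkeys]
      rw [List.filter_congr (fun q _ => hcont q), List.map_map]
      symm
      refine (List.map_congr_left ?_).trans (List.map_id _)
      rintro ⟨f, w⟩ hq
      simp only [Function.comp_apply]
      have hmemf := List.mem_filter.mp hq
      have hnotf : f ∉ pvFieldsOf (g0 :: rest) := by
        have := hmemf.2; simp at this; exact this.2
      have hwne : w ≠ none := by
        have := hmemf.2; simp at this; exact Option.isSome_iff_ne_none.mp (by simp [this.1])
      have hnone : pvLookNN (g0 :: rest) f = none :=
        pvLookNN_eq_none _ _ (pvFieldsOf_out g0 rest hrest f hnotf)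
      have happ : pvLookNN (g0 :: (rest ++ [r])) f = r.getD f none := by
        rw [hgrp, pvLookNN_append, if_pos hnone]
      have hgd : r.getD f none = w := PySem.Dict.getD_of_mem_items r hmemf.1 hrr none
      rw [happ, hgd]
      rfl

lemma pvNewKeys_append (ik : List String) (l₁ l₂ : List (PySem.Dict String (Option String)))
    (seen : List (List (Option String))) :
    pvNewKeys ik (l₁ ++ l₂) seen
      = pvNewKeys ik l₁ seen ++ pvNewKeys ik l₂ (seen ++ pvNewKeys ik l₁ seen) := by
  induction l₁ generalizing seen with
  | nil => simp [pvNewKeys]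
  | cons r rest ih =>
    simp only [List.cons_append, pvNewKeys]
    by_cases h : pvKeyOf r ik ∈ seen
    · simp only [if_pos h, ih]
    · simp [if_neg h, ih, List.cons_append, List.append_assoc]

lemma pvNewKeys_nodup (ik : List String) (l : List (PySem.Dict String (Option String)))
    (seen : List (List (Option String))) :
    (∀ k ∈ pvNewKeys ik l seen, k ∉ seen) ∧ (pvNewKeys ik l seen).Nodup := by
  induction l generalizing seen with
  | nil => simp [pvNewKeys]
  | cons r rest ih =>
    simp only [pvNewKeys]
    by_cases h : pvKeyOf r ik ∈ seen
    · simpa [if_pos h] using ih seen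
    · simp only [if_neg h]
      obtain ⟨h1, h2⟩ := ih (seen ++ [pvKeyOf r ik])
      constructor
      · intro k hk
        rcases List.mem_cons.mp hk with rfl | hk'
        · exact h
        · intro hs; exact h1 k hk' (by simp [hs])
      · refine List.nodup_cons.mpr ⟨fun hmem => ?_, h2⟩
        exact h1 _ hmem (by simp)

lemma pvNewKeys_covers (ik : List String) (l : List (PySem.Dict String (Option String)))
    (seen : List (List (Option String))) :
    ∀ r ∈ l, pvKeyOf r ik ∈ seen ++ pvNewKeys ik l seen := by
  induction l generalizing seen with
  | nil => simp
  | cons r rest ih =>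
    intro r' hr'
    simp only [pvNewKeys]
    by_cases h : pvKeyOf r ik ∈ seen
    · rw [if_pos h]
      rcases List.mem_cons.mp hr' with rfl | hr''
      · exact List.mem_append_left _ h
      · exact ih seen r' hr''
    · rw [if_neg h]
      rcases List.mem_cons.mp hr' with rfl | hr''
      · simp
      · have := ih (seen ++ [pvKeyOf r ik]) r' hr''
        simp only [List.append_assoc, List.singleton_append] at this ⊢
        simpa using this

lemma pvNewKeys_sound (ik : List String) (l : List (PySem.Dict String (Option String)))
    (seen : List (List (Option String))) :
    ∀ k ∈ pvNewKeys ik l seen, ∃ r ∈ l, pvKeyOf r ik = k := by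
  induction l generalizing seen with
  | nil => simp [pvNewKeys]
  | cons r rest ih =>
    intro k hk
    simp only [pvNewKeys] at hk
    by_cases h : pvKeyOf r ik ∈ seen
    · rw [if_pos h] at hk
      obtain ⟨r', hr', rfl⟩ := ih seen k hk
      exact ⟨r', List.mem_cons_of_mem _ hr', rfl⟩
    · rw [if_neg h] at hk
      rcases List.mem_cons.mp hk with rfl | hk'
      · exact ⟨r, List.mem_cons_self, rfl⟩
      · obtain ⟨r', hr', rfl⟩ := ih _ k hk'
        exact ⟨r', List.mem_cons_of_mem _ hr', rfl⟩

lemma pvGrpOf_append (all : List (PySem.Dict String (Option String)))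
    (r : PySem.Dict String (Option String)) (ik : List String) (k : List (Option String)) :
    pvGrpOf (all ++ [r]) ik k
      = pvGrpOf all ik k ++ (if pvKeyOf r ik = k then [r] else []) := by
  simp only [pvGrpOf, List.filter_append, List.filter_cons, List.filter_nil]
  by_cases h : pvKeyOf r ik = k
  · simp [h]
  · simp [h, show (pvKeyOf r ik == k) = false by simp [h]]

lemma pvGrpOf_ne_nil (all : List (PySem.Dict String (Option String))) (ik : List String)
    (k : List (Option String)) (hk : k ∈ pvNewKeys ik all []) : pvGrpOf all ik k ≠ [] := by
  obtain ⟨r, hr, rfl⟩ := pvNewKeys_sound ik all [] k hk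
  intro hnil
  have : r ∈ pvGrpOf all ik (pvKeyOf r ik) := List.mem_filter.mpr ⟨hr, by simp⟩
  rw [hnil] at this
  exact absurd this (List.not_mem_nil)

lemma pvA_foldl (ik : List String) (all : List (PySem.Dict String (Option String))) :
    (all.foldl (pvStepA ik) PySem.Dict.empty).items
      = (pvNewKeys ik all []).map (fun k => (k, pvMergeA (pvGrpOf all ik k))) := by
  induction all using List.reverseRecOn with
  | nil => simp [pvNewKeys, PySem.Dict.empty]
  | append_singleton l r ih =>
    rw [List.foldl_append, List.foldl_cons, List.foldl_nil]
    have hNK := pvNewKeys_append ik l [r] []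
    have hNKr : pvNewKeys ik [r] ([] ++ pvNewKeys ik l []) =
        (if pvKeyOf r ik ∈ pvNewKeys ik l [] then [] else [pvKeyOf r ik]) := by
      simp [pvNewKeys]
    set st := l.foldl (pvStepA ik) PySem.Dict.empty with hst
    set NK := pvNewKeys ik l [] with hNKdef
    have hkeys : st.keys = NK := by
      rw [← pvKeys_map_fst, ih, List.map_map]
      simp [Function.comp_def]
    have hnodupNK : NK.Nodup := (pvNewKeys_nodup ik l []).2
    have hcont : st.contains (pvKeyOf r ik) = decide (pvKeyOf r ik ∈ NK) := by
      rw [PySem.Dict.contains_eq_decide_mem_keys, hkeys]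
    by_cases hin : pvKeyOf r ik ∈ NK
    · -- existing key: overwrite with the filled record
      have hcont' : st.contains (pvKeyOf r ik) = true := by simp [hcont, hin]
      have hgd : st.getD (pvKeyOf r ik) PySem.Dict.empty
          = pvMergeA (pvGrpOf l ik (pvKeyOf r ik)) := by
        apply PySem.Dict.getD_of_mem_items
        · rw [ih]; exact List.mem_map.mpr ⟨pvKeyOf r ik, hin, rfl⟩
        · rw [hkeys]; exact hnodupNK
      simp only [pvStepA, hcont', Bool.true_eq_false]
      rw [if_neg not_false]
      rw [PySem.Dict.items_insert_of_contains st _ hcont', ih]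
      rw [hNK, hNKr, if_pos hin, List.append_nil, List.map_map]
      apply List.map_congr_left
      intro k hk
      simp only [Function.comp_apply]
      by_cases hkr : k = pvKeyOf r ik
      · subst hkr
        rw [if_pos (by simp)]
        rw [pvGrpOf_append, if_pos rfl,
          pvMergeA_append _ _ (pvGrpOf_ne_nil l ik _ hin), hgd]
      · rw [if_neg (by simp [hkr])]
        rw [pvGrpOf_append, if_neg (fun h => hkr h.symm), List.append_nil]
    · -- fresh key: append the record itself
      have hcont' : st.contains (pvKeyOf r ik) = false := by simp [hcont, hin]
      simp only [pvStepA, hcont']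
      rw [if_pos trivial]
      rw [PySem.Dict.items_insert_of_not_contains st _ hcont', ih]
      rw [hNK, hNKr, if_neg hin, List.map_append]
      congr 1
      · apply List.map_congr_left
        intro k hk
        have hkr : pvKeyOf r ik ≠ k := fun h => hin (h ▸ hk)
        rw [pvGrpOf_append, if_neg hkr, List.append_nil]
      · have hgrp : pvGrpOf (l ++ [r]) ik (pvKeyOf r ik) = [r] := by
          rw [pvGrpOf_append, if_pos rfl]
          have : pvGrpOf l ik (pvKeyOf r ik) = [] := by
            rcases hres : pvGrpOf l ik (pvKeyOf r ik) with _ | ⟨x, xs⟩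
            · rfl
            · exfalso
              have hx : x ∈ pvGrpOf l ik (pvKeyOf r ik) := by rw [hres]; simp
              have hxl := List.mem_filter.mp hx
              have : pvKeyOf x ik = pvKeyOf r ik := by simpa using hxl.2
              have := this ▸ pvNewKeys_covers ik l [] x hxl.1
              simp only [List.nil_append] at this
              exact hin this
          rw [this, List.nil_append]
        simp [hgrp]
        rfl

theorem combine_rows_with_missing_values_spec : Claim_equal_combine_rows_with_missing_values := by
  intro records identifying_keys _ _
  unfold Spec_combine_rows_with_missing_values
  unfold combine_rows_with_missing_values combine_rows_with_missing_values_alt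
  set all := records.map pvRecOf with hall
  have hn : ∀ r ∈ all, r.keys.Nodup := by
    intro r hr
    obtain ⟨x, _, rfl⟩ := List.mem_map.mp hr
    exact PySem.Dict.nodup_keys_ofList x
  show List.map PySem.Dict.items ((all.foldl (pvStepA identifying_keys) PySem.Dict.empty).values)
      = List.map PySem.Dict.items (pvBLoop all identifying_keys all [])
  rw [pvBLoop_eq]
  show List.map PySem.Dict.items
      (((all.foldl (pvStepA identifying_keys) PySem.Dict.empty).items).map Prod.snd) = _
  rw [pvA_foldl]
  rw [List.map_map, List.map_map, List.map_map]
  apply List.map_congr_left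
  intro k hk
  simp only [Function.comp_apply]
  obtain ⟨g0, grest, hgrp⟩ : ∃ g0 grest, pvGrpOf all identifying_keys k = g0 :: grest := by
    rcases h : pvGrpOf all identifying_keys k with _ | ⟨g0, grest⟩
    · exact absurd h (pvGrpOf_ne_nil all identifying_keys k hk)
    · exact ⟨g0, grest, rfl⟩
  have hmem : ∀ g ∈ pvGrpOf all identifying_keys k, g.keys.Nodup := by
    intro g hg
    exact hn g (List.mem_of_mem_filter hg)
  rw [hgrp] at hmem
  have h0 : g0.keys.Nodup := hmem g0 (by simp)
  have hrest : ∀ g ∈ grest, g.keys.Nodup := fun g hg => hmem g (List.mem_cons_of_mem _ hg)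
  rw [hgrp, pvMergeA_items g0 grest h0 hrest,
    pvMergeB_items _ (pvFieldsOf_nodup g0 grest h0 hrest)]
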